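-- pv_equiv track=rewrite | github.com/younissk/TACoBeLAL | src/utils/review_mcq_order_labels.py | _build_option_model_predictions
-- ===== SOURCE A (Python) =====
-- from typing import Any
--
-- def _model_pill(model_name: str) -> tuple[str, str]:
--     key = model_name.lower()
--     if "audio-flamingo" in key:
--         return "AF3", "pill-af3"
--     if "qwen" in key:
--         return "QWEN", "pill-qwen"
--     short = model_name.upper()
--     if len(short) > 10:
--         short = short[:10]
--     return short, "pill-other"
--
-- def _build_option_model_predictions(model_data: dict[str, dict[str, Any]]) -> dict[str, list[tuple[str, str]]]:
--     by_label: dict[str, list[tuple[str, str]]] = {}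
--     for model_name, details in model_data.items():
--         predicted_label = str(details.get("predicted_label", "")).strip()
--         if not predicted_label:
--             continue
--         by_label.setdefault(predicted_label, []).append(_model_pill(model_name))
--     for label in by_label:
--         by_label[label].sort(key=lambda x: x[0])
--     return by_label
-- ===== SOURCE B (Python) =====
-- from typing import Any
--
-- def _model_pill(model_name: str) -> tuple[str, str]:
--     key = model_name.lower()
--     if "audio-flamingo" in key:
--         return "AF3", "pill-af3"
--     if "qwen" in key:
--         return "QWEN", "pill-qwen"
--     short = model_name.upper()
--     if len(short) > 10:
--         short = short[:10]
--     return short, "pill-other"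
--
-- def _build_option_model_predictions(model_data: dict[str, dict[str, Any]]) -> dict[str, list[tuple[str, str]]]:
--     labeled = [(str(details.get("predicted_label", "")).strip(), model_name)
--                for model_name, details in model_data.items()]
--     labels: list[str] = []
--     for lab, _ in labeled:
--         if lab and lab not in labels:
--             labels.append(lab)
--     return {lab: sorted((_model_pill(name) for l, name in labeled if l == lab),
--                         key=lambda p: p[0])
--             for lab in labels}
-- ===== Notes on version B (the rewrite author's own statement) =====
-- stated objective: alternative
-- what changed: A builds the groups in one pass with dict setdefault/append and then sorts each group's list in place; B first extracts the (stripped label, model) pairs, dedups the nonempty labels in encounter order, and builds the result as a per-label filter-and-sort comprehension.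
import Mathlib
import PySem

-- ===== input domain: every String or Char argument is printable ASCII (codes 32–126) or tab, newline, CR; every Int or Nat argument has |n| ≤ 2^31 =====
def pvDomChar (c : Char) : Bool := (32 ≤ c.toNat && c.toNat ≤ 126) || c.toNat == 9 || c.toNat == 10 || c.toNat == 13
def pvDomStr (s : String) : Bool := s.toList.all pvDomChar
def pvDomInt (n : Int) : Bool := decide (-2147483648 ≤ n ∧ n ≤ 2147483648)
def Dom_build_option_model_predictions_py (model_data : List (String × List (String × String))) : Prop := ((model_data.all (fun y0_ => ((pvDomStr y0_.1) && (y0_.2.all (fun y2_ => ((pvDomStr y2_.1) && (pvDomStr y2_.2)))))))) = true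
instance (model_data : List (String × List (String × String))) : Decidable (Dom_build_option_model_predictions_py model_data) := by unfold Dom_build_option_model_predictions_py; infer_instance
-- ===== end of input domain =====

-- B replaces A's one-pass dict accumulation + per-group in-place sorts by a label dedup pass
-- followed by one per-label filter-and-sort comprehension (objective: alternative decomposition).
-- Equivalence is about the returned value; neither program mutates its argument.

-- ===== PORT A =====
-- helper _model_pill (shared by both Pythons verbatim)
def pvModelPill (model_name : String) : String × String :=
  let key := PySem.Str.lower model_name
  if PySem.Str.isIn "audio-flamingo" key then ("AF3", "pill-af3")
  else if PySem.Str.isIn "qwen" key then ("QWEN", "pill-qwen")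
  else
    let short := PySem.Str.upper model_name
    let short := if PySem.Str.len short > 10 then PySem.Str.slice short none (some 10) else short
    (short, "pill-other")

-- str(details.get(...)) : the values are strings, so str() is the identity here
def build_option_model_predictions_py (model_data : List (String × List (String × String))) : List (String × List (String × String)) :=
  let by_label : PySem.Dict String (List (String × String)) :=
    model_data.foldl (fun d item =>
      let predicted_label := PySem.Str.strip ((PySem.Dict.mk item.2).getD "predicted_label" "")
      if predicted_label == "" then d
      else d.modify predicted_label [] (fun v => v ++ [pvModelPill item.1])) PySem.Dict.empty
  by_label.items.map (fun p => (p.1, PySem.List.sorted p.2 (fun x => x.1) false))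

-- ===== PORT B =====
def build_option_model_predictions_py_alt (model_data : List (String × List (String × String))) : List (String × List (String × String)) :=
  let labeled := model_data.map (fun it =>
    (PySem.Str.strip ((PySem.Dict.mk it.2).getD "predicted_label" ""), it.1))
  let labels := labeled.foldl (fun acc p =>
    if p.1 ≠ "" ∧ p.1 ∉ acc then acc ++ [p.1] else acc) []
  labels.map (fun lab =>
    (lab, PySem.List.sorted ((labeled.filter (fun p => p.1 == lab)).map (fun p => pvModelPill p.2))
            (fun x => x.1) false))

-- ===== PRECONDITION & SPEC =====
-- Pre_ excludes association lists with duplicate outer model names or duplicate keys inside a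
-- details dict: a Python dict cannot hold duplicates (later entries silently overwrite earlier
-- ones), so such lists have no faithful dict counterpart.
def Pre_build_option_model_predictions_py (model_data : List (String × List (String × String))) : Prop :=
  (model_data.map Prod.fst).Nodup ∧ ∀ item ∈ model_data, (item.2.map Prod.fst).Nodup
instance (model_data : List (String × List (String × String))) : Decidable (Pre_build_option_model_predictions_py model_data) := by unfold Pre_build_option_model_predictions_py; infer_instance
def pvWitness_build_option_model_predictions_py : (List (String × List (String × String))) :=
  [("modelA", [("predicted_label", " yes ")]), ("qwen-7b", [("predicted_label", "yes")]), ("m3", [("other", "x")])]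

def Spec_build_option_model_predictions_py (model_data : List (String × List (String × String))) (out : List (String × List (String × String))) : Prop := out = build_option_model_predictions_py_alt model_data
instance (model_data : List (String × List (String × String))) (out : List (String × List (String × String))) : Decidable (Spec_build_option_model_predictions_py model_data out) := by unfold Spec_build_option_model_predictions_py; infer_instance

-- ===== CLAIM (what is proved, stated in full; the proofs are below) =====
def Claim_equal_build_option_model_predictions_py : Prop := ∀ (model_data : List (String × List (String × String))), Dom_build_option_model_predictions_py model_data → Pre_build_option_model_predictions_py model_data → Spec_build_option_model_predictions_py model_data (build_option_model_predictions_py model_data)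

-- ===== LEMMAS AND PROOFS =====

-- A's guarded fold is the unguarded fold over the nonempty-label entries
theorem pv_fold_filter (L : List (String × String)) (d : PySem.Dict String (List (String × String))) :
    L.foldl (fun d p => if p.1 == "" then d else d.modify p.1 [] (fun v => v ++ [pvModelPill p.2])) d
      = (L.filter (fun p => !(p.1 == ""))).foldl
          (fun d p => d.modify p.1 [] (fun v => v ++ [pvModelPill p.2])) d := by
  induction L generalizing d with
  | nil => rfl
  | cons p t ih =>
    by_cases h : p.1 = ""
    · simpa [List.foldl_cons, h] using ih d
    · simpa [List.foldl_cons, h] using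
        ih (d.modify p.1 [] (fun v => v ++ [pvModelPill p.2]))

-- B's label-collecting loop computes Set.update of the nonempty labels
theorem pv_labels_eq (L : List (String × String)) (acc : List String) :
    L.foldl (fun acc p => if p.1 ≠ "" ∧ p.1 ∉ acc then acc ++ [p.1] else acc) acc
      = PySem.Set.update acc ((L.filter (fun p => !(p.1 == ""))).map Prod.fst) := by
  induction L generalizing acc with
  | nil => rfl
  | cons p t ih =>
    by_cases h : p.1 = ""
    · simp [List.foldl_cons, h, ih]
    · by_cases hm : p.1 ∈ acc
      · simp [List.foldl_cons, h, hm, ih, PySem.Set.update, PySem.Set.add, PySem.Set.contains]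
      · simp [List.foldl_cons, h, hm, ih, PySem.Set.update, PySem.Set.add, PySem.Set.contains]

theorem build_option_model_predictions_py_spec_aux (model_data : List (String × List (String × String))) :
    build_option_model_predictions_py model_data = build_option_model_predictions_py_alt model_data := by
  simp only [build_option_model_predictions_py, build_option_model_predictions_py_alt]
  set L := model_data.map (fun it =>
    (PySem.Str.strip ((PySem.Dict.mk it.2).getD "predicted_label" ""), it.1)) with hL
  set fl := L.filter (fun p => !(p.1 == "")) with hfl
  -- rewrite A's fold over model_data into a fold over L
  have hAfold :
      model_data.foldl (fun d item =>
        let predicted_label := PySem.Str.strip ((PySem.Dict.mk item.2).getD "predicted_label" "")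
        if predicted_label == "" then d
        else d.modify predicted_label [] (fun v => v ++ [pvModelPill item.1])) PySem.Dict.empty
        = fl.foldl (fun d p => d.modify p.1 [] (fun v => v ++ [pvModelPill p.2])) PySem.Dict.empty := by
    rw [hfl, ← pv_fold_filter, hL, List.foldl_map]
  rw [hAfold]
  set D := fl.foldl (fun d p => d.modify p.1 [] (fun v => v ++ [pvModelPill p.2])) PySem.Dict.empty with hD
  have hnodup : D.keys.Nodup := by
    apply PySem.Dict.nodup_keys_foldl_modify_key fl Prod.fst []
      (fun d x => fun v => v ++ [pvModelPill x.2])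
    simp [PySem.Dict.empty, PySem.Dict.keys]
  have hkeys : D.keys = PySem.Set.ofList (fl.map Prod.fst) := by
    rw [hD, PySem.Dict.keys_foldl_modify_key fl Prod.fst []
      (fun d x => fun v => v ++ [pvModelPill x.2])]
    simp [PySem.Dict.empty, PySem.Dict.keys, PySem.Set.update, PySem.Set.ofList, PySem.Set.empty]
  have hval : ∀ c, D.getD c [] = (fl.filter (fun p => p.1 == c)).map (fun p => pvModelPill p.2) := by
    intro c
    have hmap : (fl.map (fun p => (p.1, pvModelPill p.2))).foldl
        (fun d p => d.modify p.1 [] (fun v => v ++ [p.2])) PySem.Dict.empty = D := by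
      rw [List.foldl_map]
    have := PySem.Dict.getD_foldl_modify_append (fl.map (fun p => (p.1, pvModelPill p.2)))
      PySem.Dict.empty c
    rw [hmap] at this
    rw [this]
    simp [PySem.Dict.empty, PySem.Dict.getD, PySem.Dict.get?, List.filter_map, Function.comp_def]
  rw [PySem.Dict.items_eq_map_keys D hnodup [], List.map_map, pv_labels_eq]
  have hupd : PySem.Set.update ([] : List String) ((L.filter (fun p => !(p.1 == ""))).map Prod.fst)
      = D.keys := by rw [hkeys]; rfl
  rw [hupd]
  apply List.map_congr_left
  intro k hk
  have hkne : k ≠ "" := by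
    rw [hkeys] at hk
    rw [PySem.Set.mem_ofList] at hk
    obtain ⟨p, hp, hpk⟩ := List.mem_map.mp hk
    have := List.of_mem_filter hp
    simp only [Bool.not_eq_eq_eq_not, Bool.not_true, beq_eq_false_iff_ne] at this
    exact hpk ▸ this
  have hfil : L.filter (fun p => p.1 == k) = fl.filter (fun p => p.1 == k) := by
    rw [hfl, List.filter_filter]
    apply List.filter_congr
    intro a _
    by_cases ha : a.1 = k
    · simp [ha, hkne]
    · simp [ha]
  simp only [Function.comp_def, hval, hfil]

-- ===== VERDICT (by name: the statement is the Claim_ definition above) =====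
theorem build_option_model_predictions_py_spec : Claim_equal_build_option_model_predictions_py := by
  intro md _ _
  unfold Spec_build_option_model_predictions_py
  exact build_option_model_predictions_py_spec_aux md
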